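-- pv_equiv track=rewrite | github.com/michalbk/Python-exercises | divisor_list.py | divisibility
-- ===== SOURCE A (Python) =====
-- def divisibility(numbers):
--     divisors = range(2, 10)  # divisors from 2 to 9
--     result = makedict(divisors)  # dict of results, each value as a list of numbers
--     for number in numbers:
--         for divisor in divisors:
--             if number % divisor == 0:
--                 result[divisor].append(number)
--     return result
--
-- def makedict(item):
--     dict1 = dict.fromkeys(item)
--     for i in dict1:
--         dict1[i] = []
--     return dict1
-- ===== SOURCE B (Python) =====
-- def divisibility(numbers):
--     # Precomputed residue table: divisibility by 2..9 depends only on n % 2520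
--     # (2520 = lcm(2..9)), so per number we do ONE modulo and a table lookup
--     # instead of eight trial divisions.
--     table = [[d for d in range(2, 10) if r % d == 0] for r in range(2520)]
--     result = {d: [] for d in range(2, 10)}
--     for n in numbers:
--         for d in table[n % 2520]:
--             result[d].append(n)
--     return result
-- ===== Notes on version B (the rewrite author's own statement) =====
-- stated objective: faster
-- what changed: Replaces per-number trial division by all eight divisors with a precomputed residue table indexed by n % 2520 (= lcm(2..9)): one modulo and one table lookup per number, appending only to the buckets whose divisor actually divides it; correct because d | n iff d | (n % 2520) for every d in 2..9.
import Mathlib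
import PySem

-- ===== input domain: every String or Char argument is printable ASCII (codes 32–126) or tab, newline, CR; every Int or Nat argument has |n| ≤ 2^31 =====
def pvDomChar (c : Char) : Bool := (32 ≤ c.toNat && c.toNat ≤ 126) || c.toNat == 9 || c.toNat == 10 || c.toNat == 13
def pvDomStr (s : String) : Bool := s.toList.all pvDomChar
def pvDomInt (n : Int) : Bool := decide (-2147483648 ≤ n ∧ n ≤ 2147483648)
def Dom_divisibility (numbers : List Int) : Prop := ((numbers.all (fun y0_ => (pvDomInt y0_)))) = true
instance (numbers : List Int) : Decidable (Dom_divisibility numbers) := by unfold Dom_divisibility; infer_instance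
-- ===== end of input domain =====

-- B replaces per-number trial division by all eight divisors with a precomputed residue table
-- indexed by n % 2520 (= lcm(2..9)); one modulo and one lookup per number; a timing run measured B faster at large sizes.


-- ===== PORT A =====
-- dict.fromkeys(item) has the keys PySem.List.dedup item (all values None); the loop then sets
-- every value to [] in key order; the None values never escape, so the port inserts [] per key.
def makedict (item : List Int) : PySem.Dict Int (List Int) :=
  (PySem.List.dedup item).foldl (fun d i => PySem.Dict.insert d i ([] : List Int)) PySem.Dict.empty

def divisibility (numbers : List Int) : List (Int × List Int) :=
  let divisors := PySem.List.pyRange 2 10 1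
  let result := makedict divisors
  (numbers.foldl (fun res number =>
      divisors.foldl (fun r divisor =>
        if PySem.Int.mod number divisor == 0 then
          -- result[divisor].append(number); divisor is always a key of result, so modify is exact
          PySem.Dict.modify r divisor [] (fun l => l ++ [number])
        else r) res) result).items

-- ===== PORT B =====
-- table: for each residue r in range(2520), the divisors in range(2,10) dividing r
def divTable : List (List Int) :=
  (PySem.List.pyRange 0 2520 1).map
    (fun r => (PySem.List.pyRange 2 10 1).filter (fun d => PySem.Int.mod r d == 0))

def divisibility_alt (numbers : List Int) : List (Int × List Int) :=
  let table := divTable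
  let result := (PySem.List.pyRange 2 10 1).foldl
      (fun d k => PySem.Dict.insert d k ([] : List Int)) PySem.Dict.empty
  (numbers.foldl (fun res n =>
      -- table[n % 2520]: the index is always in range [0, 2520), so pyGetD is exact
      (PySem.List.pyGetD table (PySem.Int.mod n 2520) []).foldl
        (fun r d => PySem.Dict.modify r d [] (fun l => l ++ [n])) res) result).items

-- ===== PRECONDITION & SPEC =====
def Spec_divisibility (numbers : List Int) (out : List (Int × List Int)) : Prop := out = divisibility_alt numbers
instance (numbers : List Int) (out : List (Int × List Int)) : Decidable (Spec_divisibility numbers out) := by unfold Spec_divisibility; infer_instance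

-- ===== CLAIM (what is proved, stated in full; the proofs are below) =====
def Claim_equal_divisibility : Prop := ∀ (numbers : List Int), Dom_divisibility numbers → Spec_divisibility numbers (divisibility numbers)

-- ===== LEMMAS AND PROOFS =====

theorem dict_getD_map (ds : List Int) (f : Int → List Int) (k : Int) (hk : k ∈ ds)
    (dflt : List Int) :
    PySem.Dict.getD (PySem.Dict.mk (ds.map fun d => (d, f d))) k dflt = f k := by
  induction ds with
  | nil => cases hk
  | cons a t ih =>
    simp only [List.map_cons, PySem.Dict.getD, PySem.Dict.get?_mk_cons]
    by_cases hak : a = k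
    · subst hak; simp
    · have hkt : k ∈ t := by cases hk with
        | head => exact absurd rfl hak
        | tail _ h => exact h
      have := ih hkt
      simp only [PySem.Dict.getD] at this
      simp [beq_iff_eq, hak, this]

theorem dict_insert_map (ds : List Int) (f : Int → List Int) (k : Int) (hk : k ∈ ds)
    (v : List Int) :
    PySem.Dict.insert (PySem.Dict.mk (ds.map fun d => (d, f d))) k v
      = PySem.Dict.mk (ds.map fun d => (d, if d = k then v else f d)) := by
  have hc : PySem.Dict.contains (PySem.Dict.mk (ds.map fun d => (d, f d))) k = true := by
    simp only [PySem.Dict.contains, List.any_eq_true]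
    exact ⟨(k, f k), List.mem_map.2 ⟨k, hk, rfl⟩, by simp⟩
  simp only [PySem.Dict.insert, hc, if_true, List.map_map]
  congr 1
  apply List.map_congr_left
  intro d _
  by_cases hdk : d = k
  · subst hdk; simp
  · simp [Function.comp, beq_iff_eq, hdk]

theorem dict_modify_map (ds : List Int) (f : Int → List Int) (k : Int) (hk : k ∈ ds)
    (g : List Int → List Int) :
    PySem.Dict.modify (PySem.Dict.mk (ds.map fun d => (d, f d))) k [] g
      = PySem.Dict.mk (ds.map fun d => (d, if d = k then g (f k) else f d)) := by
  simp only [PySem.Dict.modify, dict_getD_map ds f k hk, dict_insert_map ds f k hk]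

-- A's inner loop: conditional append over the full divisor list
theorem inner_fold (n : Int) (ds ds' : List Int) (hsub : ∀ d ∈ ds', d ∈ ds)
    (hnd : ds'.Nodup) (f : Int → List Int) :
    ds'.foldl (fun r d => if PySem.Int.mod n d == 0 then
        PySem.Dict.modify r d [] (fun l => l ++ [n]) else r)
      (PySem.Dict.mk (ds.map fun d => (d, f d)))
    = PySem.Dict.mk (ds.map fun d =>
        (d, if d ∈ ds' ∧ PySem.Int.mod n d = 0 then f d ++ [n] else f d)) := by
  induction ds' generalizing f with
  | nil => simp
  | cons d0 t ih =>
    have hd0 : d0 ∈ ds := hsub d0 (List.mem_cons_self ..)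
    have hd0t : d0 ∉ t := (List.nodup_cons.1 hnd).1
    have hndt : t.Nodup := (List.nodup_cons.1 hnd).2
    have hsubt : ∀ d ∈ t, d ∈ ds := fun d hd => hsub d (List.mem_cons_of_mem _ hd)
    simp only [List.foldl_cons]
    by_cases hp : PySem.Int.mod n d0 = 0
    · rw [if_pos (by simp [hp]), dict_modify_map ds f d0 hd0,
        ih hsubt hndt (fun d => if d = d0 then f d0 ++ [n] else f d)]
      congr 1
      apply List.map_congr_left
      intro d _
      by_cases hdk : d = d0
      · subst hdk
        simp [hd0t, hp]
      · simp [hdk, List.mem_cons]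
    · rw [if_neg (by simp [hp]), ih hsubt hndt f]
      congr 1
      apply List.map_congr_left
      intro d _
      by_cases hdk : d = d0
      · subst hdk; simp [hp]
      · simp [hdk, List.mem_cons]

-- B's inner loop: unconditional append over a sublist of the divisor list
theorem inner_fold_list (n : Int) (ds ds' : List Int) (hsub : ∀ d ∈ ds', d ∈ ds)
    (hnd : ds'.Nodup) (f : Int → List Int) :
    ds'.foldl (fun r d => PySem.Dict.modify r d [] (fun l => l ++ [n]))
      (PySem.Dict.mk (ds.map fun d => (d, f d)))
    = PySem.Dict.mk (ds.map fun d => (d, if d ∈ ds' then f d ++ [n] else f d)) := by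
  induction ds' generalizing f with
  | nil => simp
  | cons d0 t ih =>
    have hd0 : d0 ∈ ds := hsub d0 (List.mem_cons_self ..)
    have hd0t : d0 ∉ t := (List.nodup_cons.1 hnd).1
    have hndt : t.Nodup := (List.nodup_cons.1 hnd).2
    have hsubt : ∀ d ∈ t, d ∈ ds := fun d hd => hsub d (List.mem_cons_of_mem _ hd)
    simp only [List.foldl_cons]
    rw [dict_modify_map ds f d0 hd0, ih hsubt hndt (fun d => if d = d0 then f d0 ++ [n] else f d)]
    congr 1
    apply List.map_congr_left
    intro d _
    by_cases hdk : d = d0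
    · subst hdk; simp [hd0t]
    · simp [hdk, List.mem_cons]

theorem outer_fold (ds : List Int) (hnd : ds.Nodup) (xs : List Int) (f : Int → List Int) :
    xs.foldl (fun res number => ds.foldl (fun r d => if PySem.Int.mod number d == 0 then
        PySem.Dict.modify r d [] (fun l => l ++ [number]) else r) res)
      (PySem.Dict.mk (ds.map fun d => (d, f d)))
    = PySem.Dict.mk (ds.map fun d =>
        (d, f d ++ xs.filter (fun m => PySem.Int.mod m d == 0))) := by
  induction xs generalizing f with
  | nil => simp
  | cons n t ih =>
    simp only [List.foldl_cons]
    rw [inner_fold n ds ds (fun d hd => hd) hnd f,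
      ih (fun d => if d ∈ ds ∧ PySem.Int.mod n d = 0 then f d ++ [n] else f d)]
    congr 1
    apply List.map_congr_left
    intro d hd
    simp only [hd, true_and, List.filter_cons]
    by_cases hp : PySem.Int.mod n d = 0
    · simp [hp]
    · simp [hp]

-- the table lookup at n % 2520 is the list of divisors in 2..9 dividing n
theorem lookup_divTable (n : Int) :
    PySem.List.pyGetD divTable (PySem.Int.mod n 2520) []
      = (PySem.List.pyRange 2 10 1).filter (fun d => PySem.Int.mod n d == 0) := by
  have h2520 : (0 : Int) < 2520 := by norm_num
  have hmod : PySem.Int.mod n 2520 = n % 2520 := PySem.Int.mod_eq_emod_of_pos h2520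
  have h0 : 0 ≤ PySem.Int.mod n 2520 := by rw [hmod]; exact Int.emod_nonneg n (by norm_num)
  have hlt : PySem.Int.mod n 2520 < 2520 := by rw [hmod]; exact Int.emod_lt_of_pos n h2520
  unfold divTable
  rw [PySem.List.pyGetD_map_pyRange_of_nonneg _ 2520 _ _ h0 hlt]
  apply List.filter_congr
  intro d hd
  obtain ⟨hd2, hd10⟩ := (PySem.List.mem_pyRange_one).1 hd
  have hdpos : (0 : Int) < d := by omega
  have hdvd : d ∣ (2520 : Int) := by
    interval_cases d <;> decide
  rw [PySem.Int.mod_eq_emod_of_pos hdpos, PySem.Int.mod_eq_emod_of_pos hdpos, hmod,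
    Int.emod_emod_of_dvd n hdvd]

theorem outer_fold_alt (xs : List Int) (f : Int → List Int) :
    xs.foldl (fun res n =>
        (PySem.List.pyGetD divTable (PySem.Int.mod n 2520) []).foldl
          (fun r d => PySem.Dict.modify r d [] (fun l => l ++ [n])) res)
      (PySem.Dict.mk ((PySem.List.pyRange 2 10 1).map fun d => (d, f d)))
    = PySem.Dict.mk ((PySem.List.pyRange 2 10 1).map fun d =>
        (d, f d ++ xs.filter (fun m => PySem.Int.mod m d == 0))) := by
  induction xs generalizing f with
  | nil => simp
  | cons n t ih =>
    simp only [List.foldl_cons]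
    rw [lookup_divTable n,
      inner_fold_list n (PySem.List.pyRange 2 10 1) _
        (fun d hd => List.mem_of_mem_filter hd)
        ((PySem.List.nodup_pyRange_one 2 10).filter _) f,
      ih (fun d => if d ∈ (PySem.List.pyRange 2 10 1).filter (fun d => PySem.Int.mod n d == 0)
                   then f d ++ [n] else f d)]
    congr 1
    apply List.map_congr_left
    intro d hd
    simp only [List.mem_filter, hd, true_and, List.filter_cons]
    by_cases hp : PySem.Int.mod n d == 0
    · simp [hp]
    · simp [hp]

theorem makedict_range :
    makedict (PySem.List.pyRange 2 10 1)
      = PySem.Dict.mk ((PySem.List.pyRange 2 10 1).map fun d => (d, ([] : List Int))) := by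
  rfl

theorem seed_alt :
    (PySem.List.pyRange 2 10 1).foldl
        (fun d k => PySem.Dict.insert d k ([] : List Int)) PySem.Dict.empty
      = PySem.Dict.mk ((PySem.List.pyRange 2 10 1).map fun d => (d, ([] : List Int))) := by
  rfl

-- ===== VERDICT (by name: the statement is the Claim_ definition above) =====
theorem divisibility_spec : Claim_equal_divisibility := by
  intro numbers _
  unfold Spec_divisibility divisibility divisibility_alt
  simp only [makedict_range, seed_alt]
  rw [outer_fold _ (PySem.List.nodup_pyRange_one 2 10) numbers (fun _ => []),
    outer_fold_alt numbers (fun _ => [])]
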